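-- pv_equiv track=rewrite | github.com/kuraru/ExcelScanner | main_otro.py | separate_by_line
-- ===== SOURCE A (Python) =====
-- MIN_POINTS_PER_LINE = 15
--
-- def separate_by_line(ocr_output: list) -> list:
--     last_y = 0
--     lines = []
--     line = []
--     for entry in ocr_output:
--         current_y = entry[0][0][1]
--         if last_y - current_y >= MIN_POINTS_PER_LINE:
--             if len(line):
--                 lines.append(line)
--             line = []
--             last_y = current_y
--         line.append(entry[1])
--     if len(line):
--         lines.append(line)
--     return lines
-- ===== SOURCE B (Python) =====
-- MIN_POINTS_PER_LINE = 15
--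
-- def separate_by_line(ocr_output: list) -> list:
--     # pass 1: record the break indices, updating the anchor only at breaks
--     cuts = []
--     last_y = 0
--     for i, entry in enumerate(ocr_output):
--         y = entry[0][0][1]
--         if last_y - y >= MIN_POINTS_PER_LINE:
--             cuts.append(i)
--             last_y = y
--     # pass 2: partition the value column at the cut points, dropping empty segments
--     values = [e[1] for e in ocr_output]
--     lines = []
--     prev = 0
--     for c in cuts + [len(values)]:
--         seg = values[prev:c]
--         if seg:
--             lines.append(seg)
--         prev = c
--     return lines
-- ===== Notes on version B (the rewrite author's own statement) =====
-- stated objective: alternative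
-- what changed: Replaces A's inline accumulation of the current line inside a single stateful loop by a two-pass decomposition: a first pass computes only the cut indices (anchor updated at breaks), then the extracted value column is partitioned at those indices by slicing, with empty segments skipped.
import Mathlib
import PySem

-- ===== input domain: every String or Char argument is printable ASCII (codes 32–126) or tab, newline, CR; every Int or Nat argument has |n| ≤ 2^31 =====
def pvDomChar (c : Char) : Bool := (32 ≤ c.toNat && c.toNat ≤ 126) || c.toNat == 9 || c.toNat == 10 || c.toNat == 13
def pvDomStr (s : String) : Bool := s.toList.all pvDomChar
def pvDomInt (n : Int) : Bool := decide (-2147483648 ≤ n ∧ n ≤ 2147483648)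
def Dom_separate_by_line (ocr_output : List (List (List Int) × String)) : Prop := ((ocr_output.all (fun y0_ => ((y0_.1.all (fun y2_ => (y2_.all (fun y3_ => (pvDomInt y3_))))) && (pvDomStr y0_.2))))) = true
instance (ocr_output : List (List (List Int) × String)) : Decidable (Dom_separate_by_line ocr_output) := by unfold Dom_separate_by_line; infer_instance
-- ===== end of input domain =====

-- B replaces A's inline line accumulation by a two-pass decomposition (cut indices, then slicing); alternative, not faster.

-- entry[0][0][1]; total with a 0 default, exact on Pre_ (where both Pythons index successfully)
def pvGetY (entry : List (List Int) × String) : Int :=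
  (PySem.List.pyGet? ((PySem.List.pyGet? entry.1 0).getD []) 1).getD 0

-- ===== PORT A =====
def separate_by_line (ocr_output : List (List (List Int) × String)) : List (List String) :=
  let st := ocr_output.foldl
    (fun (st : Int × List (List String) × List String) entry =>
      let current_y := pvGetY entry
      if st.1 - current_y ≥ 15 then
        (current_y, (if st.2.2 ≠ [] then st.2.1 ++ [st.2.2] else st.2.1), [entry.2])
      else
        (st.1, st.2.1, st.2.2 ++ [entry.2]))
    (0, [], [])
  if st.2.2 ≠ [] then st.2.1 ++ [st.2.2] else st.2.1

-- ===== PORT B =====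
def separate_by_line_alt (ocr_output : List (List (List Int) × String)) : List (List String) :=
  let c1 := (PySem.List.enumerate ocr_output).foldl
    (fun (st : Int × List Int) ie =>
      let y := pvGetY ie.2
      if st.1 - y ≥ 15 then (y, st.2 ++ [ie.1]) else st)
    (0, [])
  let values := ocr_output.map (fun e => e.2)
  let fin := (c1.2 ++ [(values.length : Int)]).foldl
    (fun (st : Int × List (List String)) c =>
      let seg := PySem.List.slice values (some st.1) (some c)
      (c, if seg ≠ [] then st.2 ++ [seg] else st.2))
    (0, [])
  fin.2

-- ===== PRECONDITION & SPEC =====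
-- Pre_ excludes exactly the inputs where the Python raises IndexError in entry[0][0][1]
-- (an entry whose point list is empty, or whose first point has fewer than 2 coordinates).
def Pre_separate_by_line (ocr_output : List (List (List Int) × String)) : Prop :=
  ∀ e ∈ ocr_output, e.1 ≠ [] ∧ 2 ≤ (e.1.headD []).length
instance (ocr_output : List (List (List Int) × String)) : Decidable (Pre_separate_by_line ocr_output) := by
  unfold Pre_separate_by_line; infer_instance

def pvWitness_separate_by_line : (List (List (List Int) × String)) := [([[0, 100]], "a")]

def Spec_separate_by_line (ocr_output : List (List (List Int) × String)) (out : List (List String)) : Prop := out = separate_by_line_alt ocr_output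
instance (ocr_output : List (List (List Int) × String)) (out : List (List String)) : Decidable (Spec_separate_by_line ocr_output out) := by unfold Spec_separate_by_line; infer_instance

-- ===== CLAIM (what is proved, stated in full; the proofs are below) =====
def Claim_equal_separate_by_line : Prop := ∀ (ocr_output : List (List (List Int) × String)), Dom_separate_by_line ocr_output → Pre_separate_by_line ocr_output → Spec_separate_by_line ocr_output (separate_by_line ocr_output)

-- ===== LEMMAS AND PROOFS =====

-- common recursive reference: one pass with anchor and pending line
def pvRef : Int → List String → List (List (List Int) × String) → List (List String)
  | _, line, [] => if line ≠ [] then [line] else []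
  | ly, line, e :: rest =>
      if ly - pvGetY e ≥ 15 then
        (if line ≠ [] then [line] else []) ++ pvRef (pvGetY e) [e.2] rest
      else
        pvRef ly (line ++ [e.2]) rest

-- recursive form of B's first pass: the cut indices of the suffix starting at index i
def pvCuts : Int → Nat → List (List (List Int) × String) → List Nat
  | _, _, [] => []
  | ly, i, e :: rest =>
      if ly - pvGetY e ≥ 15 then i :: pvCuts (pvGetY e) (i + 1) rest
      else pvCuts ly (i + 1) rest

-- recursive form of B's second pass: partition values at the cut list, skip empty segments
def pvSegs (values : List String) : Nat → List Nat → List (List String)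
  | _, [] => []
  | prev, c :: cs =>
      (if (values.drop prev).take (c - prev) ≠ [] then [(values.drop prev).take (c - prev)] else [])
        ++ pvSegs values c cs

lemma pvFoldA (l : List (List (List Int) × String)) :
    ∀ (ly : Int) (lines : List (List String)) (line : List String),
    (let st := l.foldl
        (fun (st : Int × List (List String) × List String) entry =>
          let current_y := pvGetY entry
          if st.1 - current_y ≥ 15 then
            (current_y, (if st.2.2 ≠ [] then st.2.1 ++ [st.2.2] else st.2.1), [entry.2])
          else
            (st.1, st.2.1, st.2.2 ++ [entry.2]))
        (ly, lines, line)
      if st.2.2 ≠ [] then st.2.1 ++ [st.2.2] else st.2.1)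
      = lines ++ pvRef ly line l := by
  induction l with
  | nil => intro ly lines line; simp [pvRef]; split_ifs <;> simp
  | cons e rest ih =>
      intro ly lines line
      simp only [List.foldl_cons]
      by_cases h : ly - pvGetY e ≥ 15
      · simp only [h, if_pos, pvRef, ih]
        split_ifs <;> simp
      · simp only [h, if_false, pvRef, ih]

lemma pvFoldCuts (l : List (List (List Int) × String)) :
    ∀ (ly : Int) (i : Nat) (acc : List Int),
    ((PySem.List.enumerate l (i : Int)).foldl
        (fun (st : Int × List Int) ie =>
          let y := pvGetY ie.2
          if st.1 - y ≥ 15 then (y, st.2 ++ [ie.1]) else st)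
        (ly, acc)).2
      = acc ++ (pvCuts ly i l).map (fun n : Nat => (n : Int)) := by
  induction l with
  | nil => intro ly i acc; simp [PySem.List.enumerate_nil, pvCuts]
  | cons e rest ih =>
      intro ly i acc
      rw [PySem.List.enumerate_cons]
      simp only [List.foldl_cons]
      by_cases h : ly - pvGetY e ≥ 15
      · have : ((i : Int) + 1) = ((i + 1 : Nat) : Int) := by push_cast; ring
        simp only [h, if_pos, this, ih, pvCuts]
        simp
      · have : ((i : Int) + 1) = ((i + 1 : Nat) : Int) := by push_cast; ring
        simp only [h, if_false, this, ih, pvCuts]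

lemma pvFoldSegs (values : List String) (cs : List Nat) :
    ∀ (prev : Nat) (acc : List (List String)),
    ((cs.map (fun n : Nat => (n : Int))).foldl
        (fun (st : Int × List (List String)) c =>
          let seg := PySem.List.slice values (some st.1) (some c)
          (c, if seg ≠ [] then st.2 ++ [seg] else st.2))
        ((prev : Nat), acc)).2
      = acc ++ pvSegs values prev cs := by
  induction cs with
  | nil => intro prev acc; simp [pvSegs]
  | cons c cs ih =>
      intro prev acc
      rw [List.map_cons, List.foldl_cons]
      rw [ih, PySem.List.slice_natCast]
      simp only [pvSegs]
      split_ifs <;> simp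

lemma pvMainB (l : List (List (List Int) × String)) :
    ∀ (values : List String) (ly : Int) (prev i : Nat),
    prev ≤ i → i + l.length = values.length → values.drop i = l.map (fun e => e.2) →
    pvSegs values prev (pvCuts ly i l ++ [values.length])
      = pvRef ly ((values.drop prev).take (i - prev)) l := by
  induction l with
  | nil =>
      intro values ly prev i hpi hlen hdrop
      have hi : i = values.length := by simpa using hlen
      subst hi
      simp [pvCuts, pvSegs, pvRef]
  | cons e rest ih =>
      intro values ly prev i hpi hlen hdrop
      have hlt : i < values.length := by simp at hlen; omega
      have hget : values[i]? = some e.2 := by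
        have := congrArg (fun xs => xs[0]?) hdrop
        simpa [List.getElem?_drop] using this
      have hdrop' : values.drop (i + 1) = rest.map (fun e => e.2) := by
        rw [← List.tail_drop, hdrop]; rfl
      by_cases h : ly - pvGetY e ≥ 15
      · simp only [pvCuts, h, if_pos, List.cons_append, pvSegs]
        have hIH := ih values (pvGetY e) i (i + 1) (by omega) (by simp at hlen ⊢; omega) hdrop'
        have htake1 : (values.drop i).take (i + 1 - i) = [e.2] := by
          have h1 : i + 1 - i = 1 := by omega
          rw [h1, hdrop]; simp
        rw [htake1] at hIH
        simp only [pvRef, h, if_pos, hIH]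
      · simp only [pvCuts, h, if_false]
        have hIH := ih values ly prev (i + 1) (by omega) (by simp at hlen ⊢; omega) hdrop'
        have htake : (values.drop prev).take (i + 1 - prev)
            = (values.drop prev).take (i - prev) ++ [e.2] := by
          have h1 : i + 1 - prev = (i - prev) + 1 := by omega
          rw [h1, List.take_add_one]
          have : (values.drop prev)[i - prev]? = some e.2 := by
            rw [List.getElem?_drop]
            have : prev + (i - prev) = i := by omega
            rw [this]; exact hget
          simp [this]
        rw [htake] at hIH
        simp only [pvRef, h, if_false, hIH]

lemma pvA_eq_ref (ocr : List (List (List Int) × String)) :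
    separate_by_line ocr = pvRef 0 [] ocr := by
  have := pvFoldA ocr 0 [] []
  simpa [separate_by_line] using this

lemma pvB_eq_ref (ocr : List (List (List Int) × String)) :
    separate_by_line_alt ocr = pvRef 0 [] ocr := by
  have hc := pvFoldCuts ocr 0 0 []
  have hmap : (pvCuts 0 0 ocr).map (fun n : Nat => (n : Int)) ++ [((ocr.map (fun e => e.2)).length : Int)]
      = (pvCuts 0 0 ocr ++ [(ocr.map (fun e => e.2)).length]).map (fun n : Nat => (n : Int)) := by
    simp
  have hs := pvFoldSegs (ocr.map (fun e => e.2)) (pvCuts 0 0 ocr ++ [(ocr.map (fun e => e.2)).length]) 0 []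
  have hmain := pvMainB ocr (ocr.map (fun e => e.2)) 0 0 0 (le_refl 0) (by simp) (by simp)
  have h0 : separate_by_line_alt ocr
      = (List.foldl
          (fun (st : Int × List (List String)) c =>
            let seg := PySem.List.slice (ocr.map (fun e => e.2)) (some st.1) (some c)
            (c, if seg ≠ [] then st.2 ++ [seg] else st.2))
          (0, [])
          (((PySem.List.enumerate ocr).foldl
              (fun (st : Int × List Int) ie =>
                let y := pvGetY ie.2
                if st.1 - y ≥ 15 then (y, st.2 ++ [ie.1]) else st)
              (0, [])).2 ++ [((ocr.map (fun e => e.2)).length : Int)])).2 := rfl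
  simp only [Nat.cast_zero] at hc hs
  rw [h0, hc, List.nil_append, hmap, hs, hmain]
  simp

-- ===== VERDICT (by name: the statement is the Claim_ definition above) =====
theorem separate_by_line_spec : Claim_equal_separate_by_line := by
  intro ocr _ _
  unfold Spec_separate_by_line
  rw [pvA_eq_ref, pvB_eq_ref]
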